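-- pv_equiv track=rewrite | github.com/eyad-elghareeb/QuizTool | scripts/sync_quiz_assets.py | serialize_string_array
-- ===== SOURCE A (Python) =====
-- def serialize_string_array(values: list[str]) -> str:
--     lines = ["["]
--     for value in values:
--         escaped = value.replace("\\", "\\\\").replace("'", "\\'")
--         lines.append(f"  '{escaped}',")
--     if len(lines) > 1:
--         lines[-1] = lines[-1].rstrip(",")
--     lines.append("]")
--     return "\n".join(lines)
-- ===== SOURCE B (Python) =====
-- def serialize_string_array(values: list[str]) -> str:
--     def esc(ch):
--         if ch == "\\":
--             return "\\\\"
--         if ch == "'":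
--             return "\\'"
--         return ch
--     if not values:
--         return "[\n]"
--     chunks = []
--     for k, v in enumerate(values):
--         chunks.append("[\n" if k == 0 else ",\n")
--         chunks.append("  '")
--         chunks.extend(map(esc, v))
--         chunks.append("'")
--     chunks.append("\n]")
--     return "".join(chunks)
-- ===== Notes on version B (the rewrite author's own statement) =====
-- stated objective: alternative
-- what changed: B emits a flat chunk stream in one pass -- the separator ("[\n" for the first element, ",\n" otherwise) is placed BEFORE each element by a position test and each character is escaped through a per-char table -- and joins it once, whereas A builds a list of complete lines via two whole-string .replace scans, appends a trailing comma to every line and rstrips it off the last; B has no line list, no global replace and no strip step.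
import Mathlib
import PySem

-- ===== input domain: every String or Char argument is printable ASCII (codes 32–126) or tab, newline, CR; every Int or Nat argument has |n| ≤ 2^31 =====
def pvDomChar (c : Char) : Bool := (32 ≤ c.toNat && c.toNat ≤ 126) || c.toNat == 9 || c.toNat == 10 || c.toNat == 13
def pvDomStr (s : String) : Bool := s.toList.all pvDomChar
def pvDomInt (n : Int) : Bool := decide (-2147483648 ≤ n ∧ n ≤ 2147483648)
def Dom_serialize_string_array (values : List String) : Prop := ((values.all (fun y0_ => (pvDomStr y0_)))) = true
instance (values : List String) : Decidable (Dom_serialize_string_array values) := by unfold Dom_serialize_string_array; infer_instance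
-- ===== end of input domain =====

-- B emits a flat chunk stream (separator chosen by position BEFORE each element,
-- per-character table escaping) joined once, instead of A's list of complete lines
-- with two global replaces, a trailing comma per line and an rstrip of the last
-- (alternative; same return value).

-- ===== PORT A =====
-- value.replace("\\", "\\\\").replace("'", "\\'")
def pvEscape (v : String) : String :=
  PySem.Str.replace (PySem.Str.replace v "\\" "\\\\") "'" "\\'"

-- s.rstrip(","): drop trailing ',' characters; exact hand port (PySem has no rstrip-with-chars)
def pvRstripComma (s : String) : String :=
  String.ofList ((s.toList.reverse.dropWhile (· == ',')).reverse)

def serialize_string_array (values : List String) : String :=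
  let lines := values.foldl (fun ls value => ls ++ ["  '" ++ pvEscape value ++ "',"]) ["["]
  let lines := if lines.length > 1
    then lines.dropLast ++ [pvRstripComma (lines.getLastD "")]
    else lines
  PySem.Str.join "\n" (lines ++ ["]"])

-- ===== PORT B =====
-- esc(ch): per-character table escaping
def pvEscStr (c : Char) : String :=
  if c = '\\' then "\\\\" else if c = '\'' then "\\'" else String.ofList [c]

def serialize_string_array_alt (values : List String) : String :=
  if values.isEmpty then "[\n]"
  else
    -- loop body: the four appends/extend of one iteration, as one chunk-list extension
    let chunks := (PySem.List.enumerate values 0).foldl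
      (fun cs kv =>
        cs ++ [if kv.1 == 0 then "[\n" else ",\n", "  '"]
           ++ kv.2.toList.map pvEscStr ++ ["'"]) []
    PySem.Str.join "" (chunks ++ ["\n]"])

-- ===== PRECONDITION & SPEC =====
def Spec_serialize_string_array (values : List String) (out : String) : Prop := out = serialize_string_array_alt values
instance (values : List String) (out : String) : Decidable (Spec_serialize_string_array values out) := by unfold Spec_serialize_string_array; infer_instance

-- ===== CLAIM (what is proved, stated in full; the proofs are below) =====
def Claim_equal_serialize_string_array : Prop := ∀ (values : List String), Dom_serialize_string_array values → Spec_serialize_string_array values (serialize_string_array values)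


-- ===== LEMMAS AND PROOFS =====

-- per-character escaping at List Char level, and its joined form
def pvEscChar (c : Char) : List Char :=
  if c = '\\' then ['\\', '\\'] else if c = '\'' then ['\\', '\''] else [c]

def pvEscJoin (v : String) : String := String.ofList (v.toList.flatMap pvEscChar)

def pvLine (v : String) : String := "  '" ++ pvEscape v ++ "',"
def pvItem (v : String) : String := "  '" ++ pvEscape v ++ "'"

-- the tail of B's result after the first item
def pvTail : List String → String
  | [] => "\n]"
  | w :: ws => ",\n" ++ "  '" ++ pvEscJoin w ++ "'" ++ pvTail ws

theorem pv_foldl_append (vs : List String) (init : List String) :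
    vs.foldl (fun ls value => ls ++ ["  '" ++ pvEscape value ++ "',"]) init
      = init ++ vs.map pvLine := by
  induction vs generalizing init with
  | nil => simp
  | cons v vs ih => simp [ih, pvLine]

theorem pv_rstrip_line (e : String) :
    pvRstripComma ("  '" ++ e ++ "',") = "  '" ++ e ++ "'" := by
  rw [← String.toList_inj]
  simp [pvRstripComma]

theorem pv_join_cons (sep p : List Char) (ls : List (List Char)) (h : ls ≠ []) :
    PySem.Chars.join sep (p :: ls) = p ++ sep ++ PySem.Chars.join sep ls := by
  cases ls with
  | nil => exact absurd rfl h
  | cons q rest => rw [PySem.Chars.join_cons_cons]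

theorem pv_inner (vs : List String) (v d : String) :
    PySem.Str.join "\n" ((((v :: vs).map pvLine).dropLast
        ++ [pvRstripComma (((v :: vs).map pvLine).getLastD d)]) ++ ["]"])
      = PySem.Str.join ",\n" ((v :: vs).map pvItem) ++ "\n]" := by
  induction vs generalizing v d with
  | nil =>
      simp only [List.map_cons, List.map_nil, List.dropLast_singleton, List.getLastD_cons,
        List.getLastD_nil]
      rw [pvLine, pv_rstrip_line, ← String.toList_inj]
      simp [PySem.Chars.join_cons_cons, PySem.Chars.join_singleton, pvItem]
  | cons w ws ih =>
      have hih := ih w (pvLine v)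
      rw [← String.toList_inj] at hih ⊢
      simp only [List.map_cons, String.toList_append, PySem.Str.toList_join] at hih ⊢
      rw [List.dropLast_cons_of_ne_nil (by simp), List.getLastD_cons]
      simp only [List.cons_append, List.map_cons]
      rw [pv_join_cons _ _ _ (by simp), pv_join_cons ",\n".toList _ _ (by simp)]
      rw [hih]
      simp [pvLine, pvItem, List.append_assoc]

-- A's result in the common join form
theorem pv_A_char (values : List String) :
    serialize_string_array values
      = if values = [] then "[\n]"
        else "[\n" ++ PySem.Str.join ",\n" (values.map pvItem) ++ "\n]" := by
  unfold serialize_string_array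
  cases values with
  | nil =>
      rw [if_pos rfl, ← String.toList_inj]
      simp [PySem.Str.toList_join, PySem.Chars.join_cons_cons, PySem.Chars.join_singleton]
  | cons v vs =>
      rw [pv_foldl_append, if_neg (by simp)]
      simp only [List.singleton_append, List.length_cons]
      rw [if_pos (by simp), List.dropLast_cons_of_ne_nil (by simp), List.getLastD_cons]
      have hinner := pv_inner vs v "["
      rw [← String.toList_inj] at hinner ⊢
      simp only [List.map_cons, List.cons_append, String.toList_append,
        PySem.Str.toList_join] at hinner ⊢
      rw [pv_join_cons _ _ _ (by simp)]
      rw [hinner]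
      simp

-- single-character replace is a character-wise flatMap
theorem pv_go_single (a : Char) (r : List Char) (s : List Char) :
    ∀ (fuel : Nat) (acc : List Char), s.length ≤ fuel →
    PySem.Chars.replace.go [a] r fuel s acc
      = acc.reverse ++ s.flatMap (fun c => if c = a then r else [c]) := by
  induction s with
  | nil =>
      intro fuel acc _
      cases fuel <;> simp [PySem.Chars.replace.go]
  | cons c t ih =>
      intro fuel acc h
      cases fuel with
      | zero => simp at h
      | succ n =>
          have hn : t.length ≤ n := by simpa using h
          rw [PySem.Chars.replace.go]
          by_cases hc : c = a
          · subst hc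
            rw [if_pos (by simp [List.isPrefixOf])]
            rw [show List.drop [c].length (c :: t) = t by simp]
            rw [ih n (r.reverse ++ acc) hn]
            simp
          · rw [if_neg (by simp [List.isPrefixOf, Ne.symm hc])]
            rw [ih n (c :: acc) hn]
            simp [hc]

theorem pv_replace_single (a : Char) (r : List Char) (s : List Char) :
    PySem.Chars.replace s [a] r = s.flatMap (fun c => if c = a then r else [c]) := by
  rw [PySem.Chars.replace]
  simp only [List.isEmpty_cons]
  simpa using pv_go_single a r s s.length [] le_rfl

-- the two global replaces equal the per-character escaping
theorem pv_escape_eq (v : String) : pvEscape v = pvEscJoin v := by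
  rw [← String.toList_inj]
  unfold pvEscape pvEscJoin
  simp only [PySem.Str.toList_replace]
  rw [show ("\\" : String).toList = ['\\'] from rfl,
      show ("\\\\" : String).toList = ['\\', '\\'] from rfl,
      show ("'" : String).toList = ['\''] from rfl,
      show ("\\'" : String).toList = ['\\', '\''] from rfl]
  rw [pv_replace_single, pv_replace_single, List.flatMap_assoc]
  have : (String.ofList (v.toList.flatMap pvEscChar)).toList = v.toList.flatMap pvEscChar := by
    simp
  rw [this]
  apply List.flatMap_congr
  intro c _
  by_cases h1 : c = '\\'
  · subst h1; simp [pvEscChar]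
  · by_cases h2 : c = '\''
    · subst h2; simp [pvEscChar]
    · simp [h1, h2, pvEscChar]

-- chunk list produced for the elements after the first
def pvTailChunks : List String → List String
  | [] => []
  | w :: ws => [",\n", "  '"] ++ w.toList.map pvEscStr ++ ["'"] ++ pvTailChunks ws

theorem pv_escStr_toList (c : Char) : (pvEscStr c).toList = pvEscChar c := by
  unfold pvEscStr pvEscChar
  split_ifs <;> simp

theorem pv_join_empty (ls : List (List Char)) :
    PySem.Chars.join ("" : String).toList ls = ls.flatten := by
  induction ls with
  | nil => simp [PySem.Chars.join_nil]
  | cons p rest ih =>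
      cases rest with
      | nil => simp [PySem.Chars.join_singleton]
      | cons q r => rw [PySem.Chars.join_cons_cons, ih]; simp

-- B's fold over the tail (start index ≥ 1) appends pvTailChunks
theorem pv_chunks_fold (vs : List String) (st : Int) (hst : 1 ≤ st) (init : List String) :
    (PySem.List.enumerate vs st).foldl
        (fun cs kv =>
          cs ++ [if kv.1 == 0 then "[\n" else ",\n", "  '"]
             ++ kv.2.toList.map pvEscStr ++ ["'"]) init
      = init ++ pvTailChunks vs := by
  induction vs generalizing st init with
  | nil => simp [PySem.List.enumerate, pvTailChunks]
  | cons w ws ih =>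
      rw [PySem.List.enumerate_cons, List.foldl_cons]
      rw [ih (st + 1) (by omega)]
      rw [show (st == 0) = false by simp; omega]
      simp [pvTailChunks]

theorem pv_esc_flatten (w : String) :
    ((w.toList.map pvEscStr).map String.toList).flatten = (pvEscJoin w).toList := by
  rw [List.map_map]
  have h : (String.toList ∘ pvEscStr) = pvEscChar := by
    funext c; exact pv_escStr_toList c
  rw [h, ← List.flatMap_def]
  simp [pvEscJoin]

-- flattening the tail chunks (plus the closer) gives pvTail
theorem pv_tail_chunks_flatten (vs : List String) :
    ((pvTailChunks vs).map String.toList).flatten ++ "\n]".toList = (pvTail vs).toList := by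
  induction vs with
  | nil => simp [pvTailChunks, pvTail]
  | cons w ws ih =>
      simp only [pvTailChunks, pvTail, List.cons_append, List.map_cons, List.map_append,
        List.flatten_cons, List.flatten_append, List.append_assoc, String.toList_append,
        List.nil_append] at ih ⊢
      rw [ih, pv_esc_flatten]

-- pvTail equals the join form over pvItem (after the escape rewrite)
theorem pv_tail_join (vs : List String) (v : String) :
    "  '" ++ pvEscJoin v ++ "'" ++ pvTail vs
      = PySem.Str.join ",\n" ((v :: vs).map pvItem) ++ "\n]" := by
  induction vs generalizing v with
  | nil =>
      rw [← String.toList_inj]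
      simp [pvTail, pvItem, pv_escape_eq, PySem.Str.toList_join, PySem.Chars.join_singleton]
  | cons w ws ih =>
      have hih := ih w
      rw [← String.toList_inj] at hih ⊢
      simp only [List.map_cons, String.toList_append, PySem.Str.toList_join, pvTail,
        pvItem, pv_escape_eq] at hih ⊢
      rw [pv_join_cons ",\n".toList _ _ (by simp)]
      simp only [List.append_assoc] at hih ⊢
      rw [hih]

-- ===== VERDICT (by name: the statement is the Claim_ definition above) =====
theorem serialize_string_array_spec : Claim_equal_serialize_string_array := by
  intro values _
  unfold Spec_serialize_string_array serialize_string_array_alt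
  rw [pv_A_char]
  cases values with
  | nil => simp
  | cons v vs =>
      rw [if_neg (by simp), if_neg (by simp)]
      rw [PySem.List.enumerate_cons, List.foldl_cons]
      rw [pv_chunks_fold vs (0 + 1) (by omega)]
      rw [show ((0 : Int) == 0) = true by simp]
      rw [← String.toList_inj]
      simp only [PySem.Str.toList_join, pv_join_empty, if_true, List.nil_append,
        List.map_append, List.map_cons, List.flatten_append, List.flatten_cons,
        List.append_assoc, String.toList_append, List.map_nil, List.flatten_nil,
        List.append_nil]
      rw [pv_tail_chunks_flatten, pv_esc_flatten]
      have hj := pv_tail_join vs v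
      rw [← String.toList_inj] at hj
      simp only [String.toList_append, List.append_assoc] at hj ⊢
      rw [hj]
      simp [PySem.Str.toList_join]
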